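-- pv_equiv track=rewrite | github.com/hirosuzuki/procon | atcoder/abc121/abc121_d.py | calc
-- ===== SOURCE A (Python) =====
-- def calc(n):
--     rs = []
--     rs.append((n + 1) // 2 % 2)
--     for i in range(1, 41):
--         d = 1 << i
--         x = n // d
--         if x % 2 == 0:
--             r = 0
--         else:
--             r = n % 2 ^ 1
--         rs.append(r)
--     return rs
-- ===== SOURCE B (Python) =====
-- def calc(n):
--     m = n % 4
--     if m == 0:
--         x = n
--     elif m == 1:
--         x = 1
--     elif m == 2:
--         x = n + 1
--     else:
--         x = 0
--     return [(x >> i) & 1 for i in range(41)]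
-- ===== Notes on version B (the rewrite author's own statement) =====
-- stated objective: simpler
-- what changed: Replaces A's per-bit loop (a floor-division and a parity/XOR case split at each of the 41 bit positions) with the closed form for the cumulative XOR selected by the residue of n modulo four, followed by a uniform bit-extraction comprehension.
import Mathlib
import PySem

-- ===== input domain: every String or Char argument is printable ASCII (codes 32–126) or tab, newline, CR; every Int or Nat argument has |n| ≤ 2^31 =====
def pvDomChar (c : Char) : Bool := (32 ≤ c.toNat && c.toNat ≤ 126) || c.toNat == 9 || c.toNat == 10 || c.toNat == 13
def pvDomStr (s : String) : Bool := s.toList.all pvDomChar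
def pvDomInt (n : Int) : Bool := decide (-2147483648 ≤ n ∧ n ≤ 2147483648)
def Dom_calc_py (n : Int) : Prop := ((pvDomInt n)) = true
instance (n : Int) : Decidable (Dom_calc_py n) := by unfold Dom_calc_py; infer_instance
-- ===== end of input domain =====

-- B replaces A's per-bit case analysis with the closed form for the cumulative XOR chosen by the residue of n mod 4,
-- then extracts the 41 bits uniformly (objective: simpler).

-- ===== PORT A =====
def calc_py (n : Int) : List Int :=
  let rs : List Int := [PySem.Int.mod (PySem.Int.floordiv (n + 1) 2) 2]
  (PySem.List.pyRange 1 41).foldl (fun rs i =>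
    let d : Int := Int.shiftLeft 1 i.toNat
    let x : Int := PySem.Int.floordiv n d
    let r : Int := if PySem.Int.mod x 2 = 0 then 0 else PySem.Int.bxor (PySem.Int.mod n 2) 1
    rs ++ [r]) rs

-- ===== PORT B =====
def calc_py_alt (n : Int) : List Int :=
  let m : Int := PySem.Int.mod n 4
  let x : Int := if m = 0 then n else if m = 1 then 1 else if m = 2 then n + 1 else 0
  (PySem.List.pyRange 0 41).map (fun i => PySem.Int.band (Int.shiftRight x i.toNat) 1)

-- ===== PRECONDITION & SPEC =====
def Spec_calc_py (n : Int) (out : List Int) : Prop := out = calc_py_alt n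
instance (n : Int) (out : List Int) : Decidable (Spec_calc_py n out) := by unfold Spec_calc_py; infer_instance

-- ===== CLAIM (what is proved, stated in full; the proofs are below) =====
def Claim_equal_calc_py : Prop := ∀ (n : Int), Dom_calc_py n → Spec_calc_py n (calc_py n)

-- ===== LEMMAS AND PROOFS =====
theorem foldl_app (f : Int → Int) (l : List Int) (init : List Int) :
    l.foldl (fun rs i => rs ++ [f i]) init = init ++ l.map f := by
  induction l generalizing init with
  | nil => simp
  | cons a t ih => simp [ih]

theorem shl_eq (k : Nat) : Int.shiftLeft 1 k = (2:Int) ^ k := by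
  rw [show Int.shiftLeft 1 k = (1:Int) <<< k from rfl, Int.shiftLeft_eq]; ring

theorem shr_eq (x : Int) (k : Nat) : Int.shiftRight x k = x / 2 ^ k := by
  rw [show Int.shiftRight x k = x >>> k from rfl, Int.shiftRight_eq_div_pow]; push_cast; rfl

theorem bit_eq (n x : Int) (k : Nat) (hk : 1 ≤ k)
    (hx : (n % 2 = 0 ∧ (x = n ∨ x = n + 1)) ∨ (n % 2 = 1 ∧ (x = 1 ∨ x = 0))) :
    (if n / 2 ^ k % 2 = 0 then (0:Int) else PySem.Int.bxor (n % 2) 1) = x / 2 ^ k % 2 := by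
  have hd : (0:Int) < 2 ^ k := by positivity
  have h2d : (2:Int) ∣ 2 ^ k := dvd_pow_self 2 (by omega)
  have hb01 : PySem.Int.bxor 0 1 = 1 := by decide
  have hb11 : PySem.Int.bxor 1 1 = 0 := by decide
  rcases hx with ⟨h2, hx | hx⟩ | ⟨h2, hx | hx⟩ <;> rw [hx]
  · rw [h2, hb01]
    have := Int.emod_two_eq (n / 2 ^ k)
    split_ifs <;> omega
  · have heq : (n + 1) / 2 ^ k = n / 2 ^ k := by
      have hmod : n % 2 ^ k % 2 = n % 2 := Int.emod_emod_of_dvd n h2d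
      have h0 : 0 ≤ n % 2 ^ k := Int.emod_nonneg n (by positivity)
      have hlt : n % 2 ^ k < 2 ^ k := Int.emod_lt_of_pos n hd
      have hdm : (2:Int) ^ k % 2 = 0 := Int.emod_eq_zero_of_dvd h2d
      have hsum := Int.mul_ediv_add_emod n (2 ^ k)
      exact ((Int.ediv_emod_unique (a := n + 1) (b := 2 ^ k) (q := n / 2 ^ k)
        (r := n % 2 ^ k + 1) hd).mpr ⟨by linarith, by omega, by omega⟩).1
    rw [heq, h2, hb01]
    have := Int.emod_two_eq (n / 2 ^ k)
    split_ifs <;> omega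
  · rw [h2, hb11]
    have h1 : (1:Int) / 2 ^ k = 0 := by
      apply Int.ediv_eq_zero_of_lt (by norm_num)
      have : (2:Int) ^ 1 ≤ 2 ^ k := pow_le_pow_right₀ (by norm_num) hk
      linarith
    rw [h1]
    split_ifs <;> rfl
  · rw [h2, hb11, Int.zero_ediv]
    split_ifs <;> rfl

-- ===== VERDICT (by name: the statement is the Claim_ definition above) =====
theorem calc_py_spec : Claim_equal_calc_py := by
  intro n _
  unfold Spec_calc_py
  have hm4 : PySem.Int.mod n 4 = n % 4 := PySem.Int.mod_eq_emod_of_pos (by norm_num)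
  have hm2 : ∀ a : Int, PySem.Int.mod a 2 = a % 2 := fun a => PySem.Int.mod_eq_emod_of_pos (by norm_num)
  simp only [calc_py, calc_py_alt, hm4, hm2]
  rw [foldl_app, show PySem.List.pyRange (0:Int) 41 = 0 :: PySem.List.pyRange 1 41 from
      PySem.List.pyRange_one_cons (by norm_num)]
  simp only [List.map_cons, List.singleton_append]
  have htail : List.map
      (fun i => if PySem.Int.floordiv n (Int.shiftLeft 1 i.toNat) % 2 = 0 then (0:Int)
                else PySem.Int.bxor (n % 2) 1) (PySem.List.pyRange 1 41) =
    List.map (fun i => PySem.Int.band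
      (Int.shiftRight (if n % 4 = 0 then n else if n % 4 = 1 then 1 else if n % 4 = 2 then n + 1 else 0) i.toNat) 1)
      (PySem.List.pyRange 1 41) := by
    apply List.map_congr_left
    intro i hi
    obtain ⟨hi1, hi2⟩ := (PySem.List.mem_pyRange_one).1 hi
    have hk : 1 ≤ i.toNat := by omega
    rw [shl_eq, PySem.Int.floordiv_eq_ediv_of_pos (by positivity),
      PySem.Int.band_one, hm2, shr_eq]
    rcases show n % 4 = 0 ∨ n % 4 = 1 ∨ n % 4 = 2 ∨ n % 4 = 3 from by omega with h | h | h | h <;> rw [h]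
    · rw [if_pos (show (0:Int) = 0 from rfl)]
      exact bit_eq n n i.toNat hk (Or.inl ⟨by omega, Or.inl rfl⟩)
    · rw [if_neg (show ¬((1:Int) = 0) from by norm_num), if_pos (show (1:Int) = 1 from rfl)]
      exact bit_eq n 1 i.toNat hk (Or.inr ⟨by omega, Or.inl rfl⟩)
    · rw [if_neg (show ¬((2:Int) = 0) from by norm_num), if_neg (show ¬((2:Int) = 1) from by norm_num),
        if_pos (show (2:Int) = 2 from rfl)]
      exact bit_eq n (n + 1) i.toNat hk (Or.inl ⟨by omega, Or.inr rfl⟩)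
    · rw [if_neg (show ¬((3:Int) = 0) from by norm_num), if_neg (show ¬((3:Int) = 1) from by norm_num),
        if_neg (show ¬((3:Int) = 2) from by norm_num)]
      exact bit_eq n 0 i.toNat hk (Or.inr ⟨by omega, Or.inr rfl⟩)
  rw [htail]
  congr 1
  rw [PySem.Int.floordiv_eq_ediv_of_pos (by norm_num), PySem.Int.band_one, hm2,
    show ((0:Int)).toNat = 0 from rfl, shr_eq, pow_zero, Int.ediv_one]
  rcases show n % 4 = 0 ∨ n % 4 = 1 ∨ n % 4 = 2 ∨ n % 4 = 3 from by omega with h | h | h | h <;> rw [h]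
  · rw [if_pos (show (0:Int) = 0 from rfl)]; omega
  · rw [if_neg (show ¬((1:Int) = 0) from by norm_num), if_pos (show (1:Int) = 1 from rfl)]; omega
  · rw [if_neg (show ¬((2:Int) = 0) from by norm_num), if_neg (show ¬((2:Int) = 1) from by norm_num),
      if_pos (show (2:Int) = 2 from rfl)]; omega
  · rw [if_neg (show ¬((3:Int) = 0) from by norm_num), if_neg (show ¬((3:Int) = 1) from by norm_num),
      if_neg (show ¬((3:Int) = 2) from by norm_num)]; omega
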